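-- pv_equiv track=rewrite | github.com/Nil-Store/nil-store | demos/kzg/nilcoin_poud_ckzg_demo.py | interpolate_coeffs
-- ===== SOURCE A (Python) =====
-- from typing import List, Tuple
--
-- FR_MODULUS = int("73eda753299d7d483339d80809a1d80553bda402fffe5bfeffffffff00000001", 16)
--
-- def fr(x: int) -> int:
--     return x % FR_MODULUS
--
-- def fr_inv(x: int) -> int:
--     if x == 0:
--         raise ZeroDivisionError("inverse of 0 in Fr")
--     return pow(x, FR_MODULUS - 2, FR_MODULUS)
--
-- def poly_mul_linear(coeffs: List[int], a: int) -> List[int]: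
--     """Return coeffs * (X - a). coeffs is little-endian: c0 + c1 X + ..."""
--     n = len(coeffs)
--     out = [0] * (n + 1)
--     # out[k] += coeffs[k-1]  (for X^{k})
--     for k in range(n):
--         out[k + 1] = coeffs[k]
--     # out[k] -= a * coeffs[k]
--     amod = a % FR_MODULUS
--     for k in range(n):
--         out[k] = fr(out[k] - amod * coeffs[k])
--     return out
--
-- def poly_div_linear(v: List[int], root: int) -> List[int]:
--     """Given v(X) = prod_j (X - x_j), return v(X) / (X - root). Synthetic division."""
--     n = len(v) - 1  # degree n
--     q = [0] * n
--     q[-1] = v[-1]  # leading coeff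
--     # Work downwards: v_k + root * q_k = q_{k-1}
--     for k in range(n - 1, 0, -1):
--         q[k - 1] = fr(v[k] + root * q[k])
--     # ignore remainder (must be 0 if root is true root)
--     return q
--
-- def interpolate_coeffs(xs: List[int], ys: List[int]) -> List[int]:
--     """
--     Compute coefficients of P with P(xs[i]) = ys[i].
--     Algorithm: Build v(X) = Π (X - x_i) once. Then for each i:
--        L_i(X) = v(X) / (X - x_i) / v'(x_i)
--     P = Σ ys[i] * L_i(X)
--     Complexity: O(n^2). Suitable for n <= ~1k in Python for a demo.
--     """
--     n = len(xs)
--     if n != len(ys):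
--         raise ValueError("xs, ys length mismatch")
--     # v(X) = ∏ (X - x_i)
--     v = [1]  # constant 1
--     for xi in xs:
--         v = poly_mul_linear(v, xi)
--     # v'(x_i) = Π_{m != i} (x_i - x_m)
--     coeffs = [0] * n  # degree <= n-1
--     for i in range(n):
--         denom = 1
--         xi = xs[i]
--         for m in range(n):
--             if m == i: continue
--             denom = fr(denom * (xi - xs[m]))
--         denom_inv = fr_inv(denom)
--         # basis poly = v(X)/(X - x_i)
--         basis = poly_div_linear(v, xi)  # degree n-1
--         scale = fr(ys[i] * denom_inv)
--         # coeffs += scale * basis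
--         for k in range(n):
--             coeffs[k] = fr(coeffs[k] + scale * basis[k])
--     return coeffs  # degree <= n-1
-- ===== SOURCE B (Python) =====
-- from typing import List
--
-- FR_MODULUS = int("73eda753299d7d483339d80809a1d80553bda402fffe5bfeffffffff00000001", 16)
--
-- def interpolate_coeffs(xs: List[int], ys: List[int]) -> List[int]:
--     """
--     Same interpolation, transposed: instead of dividing v(X) by each (X - x_i)
--     and accumulating per-point basis polynomials, expand
--         P_k = sum_{t=k+1..n} v[t] * S[t-1-k],   S[r] = sum_i w_i * x_i^r
--     (w_i the Lagrange weights), so the combine is one correlation of v's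
--     coefficients with the weighted power sums. No polynomial division at all.
--     """
--     P = FR_MODULUS
--     n = len(xs)
--     if n != len(ys):
--         raise ValueError("xs, ys length mismatch")
--     # v(X) = prod (X - x_i), little-endian
--     v = [1]
--     for x in xs:
--         v = [(hi - x * lo) % P for lo, hi in zip(v + [0], [0] + v)]
--     # Lagrange weights w_i = ys[i] / prod_{m != i} (x_i - x_m)
--     ws = []
--     for i in range(n):
--         d = 1
--         for m in range(n):
--             if m != i:
--                 d = d * (xs[i] - xs[m]) % P
--         ws.append(ys[i] * pow(d, P - 2, P) % P)
--     # weighted power sums S[r] = sum_i w_i * x_i^r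
--     S = []
--     pw = ws[:]
--     for _ in range(n):
--         S.append(sum(pw) % P)
--         pw = [p_ * x % P for p_, x in zip(pw, xs)]
--     # coefficient k of P is the correlation of v (above degree k) with S
--     return [sum(v[t] * S[t - 1 - k] for t in range(k + 1, n + 1)) % P for k in range(n)]
-- ===== Notes on version B (the rewrite author's own statement) =====
-- stated objective: alternative
-- what changed: Instead of synthetic-dividing v(X) by each (X - x_i) and accumulating the scaled basis polynomials point by point, B computes the Lagrange weights, then the weighted power sums S_r = sum_i w_i x_i^r, and reads each coefficient off as a correlation of v's coefficients with S — no polynomial division at all.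
import Mathlib
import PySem

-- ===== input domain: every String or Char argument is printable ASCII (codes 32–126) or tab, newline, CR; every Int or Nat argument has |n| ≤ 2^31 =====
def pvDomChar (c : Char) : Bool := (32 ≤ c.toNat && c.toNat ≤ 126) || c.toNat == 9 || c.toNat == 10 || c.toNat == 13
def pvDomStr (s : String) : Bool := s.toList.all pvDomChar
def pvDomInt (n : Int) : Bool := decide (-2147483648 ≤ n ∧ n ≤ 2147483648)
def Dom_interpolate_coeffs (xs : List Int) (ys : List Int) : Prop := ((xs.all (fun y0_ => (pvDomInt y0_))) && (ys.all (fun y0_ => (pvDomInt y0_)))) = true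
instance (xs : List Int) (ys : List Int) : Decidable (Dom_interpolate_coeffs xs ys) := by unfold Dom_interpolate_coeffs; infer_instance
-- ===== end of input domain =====

-- B replaces A's per-point synthetic division and per-point accumulation by one correlation of
-- v's coefficients with weighted power sums (same O(n^2) cost, no polynomial division at all);
-- objective: alternative algorithm.

-- ===== PORT A =====

def FR_MODULUS : Int := 52435875175126190479447740508185965837690552500527637822603658699938581184513

def fr (x : Int) : Int := PySem.Int.mod x FR_MODULUS

-- shared port of Python's three-argument pow(b, e, m) (m > 0): binary exponentiation with a
-- structural fuel of 256 halvings — exact for every e < 2^256 (both call sites use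
-- e = FR_MODULUS - 2 < 2^255).  PySem.Int.powMod is definitionally (b ^ e) % m, which is not
-- feasibly computable for a 255-bit exponent, so the halving loop is ported by hand; it is
-- exact there because b^e = (b^(e/2))^2 * b^(e mod 2) and Python's pow reduces mod m each step.
def powmodAux : Nat → Int → Nat → Int → Int
  | 0, _, _, m => 1 % m
  | fuel+1, b, e, m =>
      if e = 0 then 1 % m
      else
        let h := powmodAux fuel b (e / 2) m
        let h2 := h * h % m
        if e % 2 = 1 then h2 * (b % m) % m else h2

def powmod (b : Int) (e : Nat) (m : Int) : Int := powmodAux 256 b e m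

-- Python raises ZeroDivisionError at x = 0 (excluded by Pre_); 0 is a junk value there.
def fr_inv (x : Int) : Int :=
  if x = 0 then 0 else powmod x (FR_MODULUS - 2).toNat FR_MODULUS

def poly_mul_linear (coeffs : List Int) (a : Int) : List Int :=
  let n : Int := PySem.List.len coeffs
  let out : List Int := List.replicate (n + 1).toNat 0
  let out := (PySem.List.pyRange 0 n 1).foldl
    (fun o k => PySem.List.pySetD o (k + 1) (PySem.List.pyGetD coeffs k 0)) out
  let amod := PySem.Int.mod a FR_MODULUS
  (PySem.List.pyRange 0 n 1).foldl
    (fun o k => PySem.List.pySetD o k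
      (fr (PySem.List.pyGetD o k 0 - amod * PySem.List.pyGetD coeffs k 0))) out

def poly_div_linear (v : List Int) (root : Int) : List Int :=
  let n : Int := PySem.List.len v - 1
  let q : List Int := List.replicate n.toNat 0
  let q := PySem.List.pySetD q (-1) (PySem.List.pyGetD v (-1) 0)
  (PySem.List.pyRange (n - 1) 0 (-1)).foldl
    (fun q k => PySem.List.pySetD q (k - 1)
      (fr (PySem.List.pyGetD v k 0 + root * PySem.List.pyGetD q k 0))) q

def interpolate_coeffs (xs : List Int) (ys : List Int) : List Int :=
  let n : Int := PySem.List.len xs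
  if n ≠ PySem.List.len ys then []  -- Python raises ValueError here; excluded by Pre_
  else
    let v := xs.foldl (fun v xi => poly_mul_linear v xi) [1]
    let coeffs : List Int := List.replicate n.toNat 0
    (PySem.List.pyRange 0 n 1).foldl (fun coeffs i =>
      let xi := PySem.List.pyGetD xs i 0
      let denom := (PySem.List.pyRange 0 n 1).foldl
        (fun denom m => if m = i then denom else fr (denom * (xi - PySem.List.pyGetD xs m 0))) 1
      let denom_inv := fr_inv denom
      let basis := poly_div_linear v xi
      let scale := fr (PySem.List.pyGetD ys i 0 * denom_inv)
      (PySem.List.pyRange 0 n 1).foldl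
        (fun coeffs k => PySem.List.pySetD coeffs k
          (fr (PySem.List.pyGetD coeffs k 0 + scale * PySem.List.pyGetD basis k 0))) coeffs)
      coeffs

-- ===== PORT B =====

def frP : Int := 52435875175126190479447740508185965837690552500527637822603658699938581184513

-- v = [(hi - x * lo) % P for lo, hi in zip(v + [0], [0] + v)]
def mulLin (v : List Int) (x : Int) : List Int :=
  ((v ++ [0]).zip (0 :: v)).map (fun (p : Int × Int) => PySem.Int.mod (p.2 - x * p.1) frP)

def interpolate_coeffs_alt (xs : List Int) (ys : List Int) : List Int :=
  let n : Int := PySem.List.len xs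
  if n ≠ PySem.List.len ys then []  -- Python raises ValueError here; excluded by Pre_
  else
    let v := xs.foldl mulLin [1]
    let ws := (PySem.List.pyRange 0 n 1).foldl (fun ws i =>
      let d := (PySem.List.pyRange 0 n 1).foldl
        (fun d m => if m = i then d
          else PySem.Int.mod (d * (PySem.List.pyGetD xs i 0 - PySem.List.pyGetD xs m 0)) frP) 1
      ws ++ [PySem.Int.mod (PySem.List.pyGetD ys i 0 * powmod d (frP - 2).toNat frP) frP]) []
    let Spw := (PySem.List.pyRange 0 n 1).foldl
      (fun (sp : List Int × List Int) _ =>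
        (sp.1 ++ [PySem.Int.mod sp.2.sum frP],
         (sp.2.zip xs).map (fun (p : Int × Int) => PySem.Int.mod (p.1 * p.2) frP)))
      ([], ws)
    let S := Spw.1
    (PySem.List.pyRange 0 n 1).map (fun k =>
      PySem.Int.mod
        (((PySem.List.pyRange (k + 1) (n + 1) 1).map
          (fun t => PySem.List.pyGetD v t 0 * PySem.List.pyGetD S (t - 1 - k) 0)).sum) frP)

-- ===== PRECONDITION & SPEC =====
-- Pre_ excludes exactly the inputs where Python A raises: a length mismatch (ValueError) and,
-- within Dom's |x| ≤ 2^31 bound, duplicate sample points, on which A's fr_inv receives 0 and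
-- raises ZeroDivisionError.
def Pre_interpolate_coeffs (xs : List Int) (ys : List Int) : Prop :=
  xs.length = ys.length ∧ xs.Nodup
instance (xs : List Int) (ys : List Int) : Decidable (Pre_interpolate_coeffs xs ys) := by
  unfold Pre_interpolate_coeffs; infer_instance

def pvWitness_interpolate_coeffs : List Int × List Int := ([1, 2, 3], [4, 5, 6])

def Spec_interpolate_coeffs (xs : List Int) (ys : List Int) (out : List Int) : Prop := out = interpolate_coeffs_alt xs ys
instance (xs : List Int) (ys : List Int) (out : List Int) : Decidable (Spec_interpolate_coeffs xs ys out) := by unfold Spec_interpolate_coeffs; infer_instance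

-- ===== CLAIM (what is proved, stated in full; the proofs are below) =====
def Claim_equal_interpolate_coeffs : Prop := ∀ (xs : List Int) (ys : List Int), Dom_interpolate_coeffs xs ys → Pre_interpolate_coeffs xs ys → Spec_interpolate_coeffs xs ys (interpolate_coeffs xs ys)

-- ===== LEMMAS AND PROOFS =====

theorem pv_hM : (0:Int) < FR_MODULUS := by decide

theorem pv_fr_eq (x : Int) : fr x = x % FR_MODULUS := PySem.Int.mod_eq_emod_of_pos pv_hM

theorem pv_modP_eq (x : Int) : PySem.Int.mod x frP = x % FR_MODULUS := PySem.Int.mod_eq_emod_of_pos pv_hM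

set_option maxRecDepth 8000 in
theorem pv_powmod_zero : powmod 0 (FR_MODULUS - 2).toNat FR_MODULUS = 0 := by decide

theorem pv_fr_inv_eq (x : Int) : fr_inv x = powmod x (FR_MODULUS - 2).toNat FR_MODULUS := by
  unfold fr_inv
  by_cases hx : x = 0
  · subst hx; rw [if_pos rfl]; exact pv_powmod_zero.symm
  · rw [if_neg hx]

theorem pv_cast_succ (k : Nat) : ((k : Int) + 1) = ((k + 1 : Nat) : Int) := by push_cast; ring

theorem pv_sum_range (n : Nat) (f : Nat → Int) :
    ((List.range n).map f).sum = ∑ i ∈ Finset.range n, f i := rfl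

theorem pv_sum_modeq {ι : Type} {s : Finset ι} (M' : Int) {f g : ι → Int}
    (h : ∀ i ∈ s, f i % M' = g i % M') :
    (∑ i ∈ s, f i) % M' = (∑ i ∈ s, g i) % M' := by
  rw [Finset.sum_int_mod, Finset.sum_congr rfl h, ← Finset.sum_int_mod]

theorem pv_mul_congr_right {a b c : Int}
    (h : b % FR_MODULUS = c % FR_MODULUS) :
    a * b % FR_MODULUS = a * c % FR_MODULUS := by
  rw [Int.mul_emod, h, ← Int.mul_emod]

theorem pv_foldl_set_pointwise (g : Nat → Int → Int) :
    ∀ (n : Nat) (o : List Int), n ≤ o.length →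
    (List.range n).foldl (fun o k => o.set k (g k (o.getD k 0))) o
      = o.mapIdx (fun j x => if j < n then g j x else x) := by
  intro n
  induction n with
  | zero =>
    intro o _
    apply List.ext_getElem
    · simp
    · intro j h1 h2; simp
  | succ n ih =>
    intro o hn
    rw [List.range_succ, List.foldl_append, ih o (by omega)]
    have hget : (o.mapIdx fun j x => if j < n then g j x else x).getD n 0 = o[n]'(by omega) := by
      rw [List.getD_eq_getElem _ _ (by simp; omega)]
      simp
    simp only [List.foldl_cons, List.foldl_nil, hget]
    apply List.ext_getElem
    · simp
    · intro j h1 h2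
      rw [List.getElem_set]
      by_cases hj : n = j
      · subst hj; simp
      · rw [if_neg hj]
        simp only [List.getElem_mapIdx]
        by_cases hlt : j < n
        · rw [if_pos hlt, if_pos (by omega)]
        · rw [if_neg hlt, if_neg (by omega)]

theorem pv_foldl_shift (c : List Int) :
    (List.range c.length).foldl (fun o k => o.set (k + 1) (c.getD k 0))
      (List.replicate (c.length + 1) 0) = 0 :: c := by
  have aux : ∀ m, m ≤ c.length →
      (List.range m).foldl (fun o k => o.set (k + 1) (c.getD k 0))
        (List.replicate (c.length + 1) 0)
      = 0 :: (c.take m ++ List.replicate (c.length - m) 0) := by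
    intro m
    induction m with
    | zero => intro _; simp [List.replicate_succ]
    | succ m ih =>
      intro hm
      rw [List.range_succ, List.foldl_append, ih (by omega)]
      simp only [List.foldl_cons, List.foldl_nil]
      have hset : ((0 : Int) :: (c.take m ++ List.replicate (c.length - m) 0)).set (m + 1) (c.getD m 0)
          = 0 :: (c.take (m + 1) ++ List.replicate (c.length - (m + 1)) 0) := by
        apply List.ext_getElem
        · simp; omega
        · intro j h1 h2
          rw [List.getElem_set]
          by_cases hj : m + 1 = j
          · subst hj
            rw [if_pos rfl]
            simp only [List.getElem_cons_succ]
            rw [List.getElem_append, dif_pos (by simp [List.length_take]; omega),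
              List.getElem_take, List.getD_eq_getElem _ _ (by omega)]
          · rw [if_neg hj]
            rcases j with _ | j
            · simp
            · simp only [List.getElem_cons_succ]
              rw [List.getElem_append, List.getElem_append]
              by_cases hjm : j < m
              · rw [dif_pos (by simp; omega), dif_pos (by simp; omega)]
                rw [List.getElem_take, List.getElem_take]
              · rw [dif_neg (by simp; omega), dif_neg (by simp; omega)]
                rw [List.getElem_replicate, List.getElem_replicate]
      rw [hset]
  have h := aux c.length le_rfl
  simpa using h

theorem pv_zip_map_range (f : Nat → Int) (xs : List Int) :
    ((List.range xs.length).map f).zip xs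
      = (List.range xs.length).map (fun i => (f i, xs.getD i 0)) := by
  apply List.ext_getElem
  · simp
  · intro j h1 h2
    simp only [List.getElem_zip, List.getElem_map, List.getElem_range]
    rw [List.getD_eq_getElem _ _ (by simp at h1; omega)]

theorem pv_foldl_addmod (f : Nat → Int) :
    ∀ (l : List Nat) (a : Int),
    l.foldl (fun acc i => (acc + f i) % FR_MODULUS) (a % FR_MODULUS)
      = (a + (l.map f).sum) % FR_MODULUS := by
  intro l
  induction l with
  | nil => intro a; simp
  | cons x l ih =>
    intro a
    simp only [List.foldl_cons]
    rw [Int.emod_add_emod, ih (a + f x)]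
    simp only [List.map_cons, List.sum_cons, add_assoc]

theorem pv_foldl_addmod0 (f : Nat → Int) (l : List Nat) :
    l.foldl (fun acc i => (acc + f i) % FR_MODULUS) 0 = ((l.map f).sum) % FR_MODULUS := by
  have h := pv_foldl_addmod f l 0
  rw [Int.zero_emod] at h
  rw [h, zero_add]

-- A's poly_mul_linear, characterized
theorem pv_mul_char (c : List Int) (a : Int) :
    poly_mul_linear c a
      = (0 :: c).mapIdx (fun j x =>
          if j < c.length then (x - a % FR_MODULUS * c.getD j 0) % FR_MODULUS else x) := by
  unfold poly_mul_linear
  have hR : PySem.List.pyRange 0 (c.length : Int) 1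
      = (List.range c.length).map (fun k : Nat => (k : Int)) := PySem.List.pyRange_zero_natCast c.length
  have htn : (((c.length + 1 : Nat) : Int)).toNat = c.length + 1 := by omega
  simp only [PySem.List.len_eq, hR, htn, List.foldl_map, pv_cast_succ,
    PySem.List.pySetD_natCast, PySem.List.pyGetD_natCast, pv_fr_eq,
    PySem.Int.mod_eq_emod_of_pos pv_hM]
  rw [pv_foldl_shift c]
  rw [pv_foldl_set_pointwise (fun k x => (x - a % FR_MODULUS * c.getD k 0) % FR_MODULUS)
    c.length (0 :: c) (by simp)]

theorem pv_mulLin_length (c : List Int) (x : Int) : (mulLin c x).length = c.length + 1 := by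
  simp [mulLin]

theorem pv_mulLin_bounded (c : List Int) (x : Int) :
    ∀ e ∈ mulLin c x, 0 ≤ e ∧ e < FR_MODULUS := by
  intro e he
  simp only [mulLin, List.mem_map] at he
  obtain ⟨p, _, rfl⟩ := he
  rw [pv_modP_eq]
  exact ⟨Int.emod_nonneg _ (by decide), Int.emod_lt_of_pos _ pv_hM⟩

theorem pv_mulLin_eq (c : List Int) (a : Int) (hb : ∀ e ∈ c, 0 ≤ e ∧ e < FR_MODULUS) :
    poly_mul_linear c a = mulLin c a := by
  rw [pv_mul_char]
  unfold mulLin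
  apply List.ext_getElem
  · simp
  · intro j h1 h2
    simp only [List.getElem_map, List.getElem_zip, List.getElem_mapIdx, pv_modP_eq]
    have hjlen : j < c.length + 1 := by simp at h1; omega
    by_cases hj : j < c.length
    · rw [if_pos hj]
      have hca : (c ++ [(0:Int)])[j]'(by simp; omega) = c.getD j 0 := by
        rw [List.getElem_append, dif_pos hj, List.getD_eq_getElem _ _ hj]
      rw [hca, List.getD_eq_getElem _ _ hj]
      conv_lhs => rw [Int.sub_emod, Int.mul_emod, Int.emod_emod_of_dvd _ dvd_rfl]
      conv_rhs => rw [Int.sub_emod, Int.mul_emod]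
    · have hj' : j = c.length := by omega
      subst hj'
      rw [if_neg (lt_irrefl _)]
      have hz : (c ++ [(0:Int)])[c.length]'(by simp) = 0 := by
        rw [List.getElem_append, dif_neg (by omega)]
        simp
      rw [hz, mul_zero, sub_zero]
      have hlt : c.length < ((0:Int) :: c).length := by simp
      have hbd : 0 ≤ ((0:Int) :: c)[c.length] ∧ ((0:Int) :: c)[c.length] < FR_MODULUS := by
        rcases List.mem_cons.mp (List.getElem_mem hlt) with h0 | hc
        · rw [h0]; exact ⟨le_refl 0, pv_hM⟩
        · exact hb _ hc
      exact (Int.emod_eq_of_lt hbd.1 hbd.2).symm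

theorem pv_v_spec (xs : List Int) :
    xs.foldl (fun v xi => poly_mul_linear v xi) [1] = xs.foldl mulLin [1]
    ∧ (xs.foldl mulLin [1]).length = xs.length + 1
    ∧ ∀ e ∈ xs.foldl mulLin [1], 0 ≤ e ∧ e < FR_MODULUS := by
  have aux : ∀ (l : List Int) (init : List Int), (∀ e ∈ init, 0 ≤ e ∧ e < FR_MODULUS) →
      l.foldl (fun v xi => poly_mul_linear v xi) init = l.foldl mulLin init
      ∧ (l.foldl mulLin init).length = init.length + l.length
      ∧ ∀ e ∈ l.foldl mulLin init, 0 ≤ e ∧ e < FR_MODULUS := by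
    intro l
    induction l with
    | nil => intro init hb; exact ⟨rfl, by simp, hb⟩
    | cons x l ih =>
      intro init hb
      simp only [List.foldl_cons]
      obtain ⟨h1, h2, h3⟩ := ih (mulLin init x) (pv_mulLin_bounded init x)
      refine ⟨?_, ?_, h3⟩
      · rw [pv_mulLin_eq init x hb, h1]
      · rw [h2, pv_mulLin_length]; simp only [List.length_cons]; omega
  have hb1 : ∀ e ∈ ([1] : List Int), 0 ≤ e ∧ e < FR_MODULUS := by
    intro e he; simp at he; subst he; exact ⟨by decide, by decide⟩
  obtain ⟨a, b, c⟩ := aux xs [1] hb1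
  refine ⟨a, ?_, c⟩
  rw [b]
  show 1 + xs.length = xs.length + 1
  omega

-- A's poly_div_linear, characterized
def pvQa (v : List Int) (root : Int) : Nat → Int
  | 0 => v.getD (v.length - 1) 0
  | i+1 => (v.getD (v.length - 2 - i) 0 + root * pvQa v root i) % FR_MODULUS

theorem pv_div_loop (v : List Int) (root : Int) (n : Nat) (hv : v.length = n + 1) :
    ∀ m : Nat, m ≤ n - 1 →
    (PySem.List.pyRange (m : Int) 0 (-1)).foldl
      (fun q k => PySem.List.pySetD q (k - 1)
        ((PySem.List.pyGetD v k 0 + root * PySem.List.pyGetD q k 0) % FR_MODULUS))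
      ((List.range n).map (fun j => if m ≤ j then pvQa v root (n - 1 - j) else 0))
    = (List.range n).map (fun j => pvQa v root (n - 1 - j)) := by
  intro m
  induction m with
  | zero =>
    intro _
    rw [PySem.List.pyRange_neg_one_eq_nil (by norm_num)]
    simp
  | succ m ih =>
    intro hm
    rw [PySem.List.pyRange_neg_one_cons (by exact_mod_cast Nat.succ_pos m)]
    have hc : ((m + 1 : Nat) : Int) - 1 = (m : Int) := by push_cast; ring
    simp only [List.foldl_cons, hc]
    have hmn : m + 1 < n := by omega
    have hgq : PySem.List.pyGetD
        ((List.range n).map (fun j => if m + 1 ≤ j then pvQa v root (n - 1 - j) else 0))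
        ((m + 1 : Nat) : Int) 0 = pvQa v root (n - 1 - (m + 1)) := by
      rw [PySem.List.pyGetD_natCast, PySem.List.getD_map_range _ _ _ _ hmn]
      rw [if_pos le_rfl]
    have hgv : PySem.List.pyGetD v ((m + 1 : Nat) : Int) 0 = v.getD (m + 1) 0 :=
      PySem.List.pyGetD_natCast v (m + 1) 0
    rw [hgq, hgv, PySem.List.pySetD_natCast]
    have hval : (v.getD (m + 1) 0 + root * pvQa v root (n - 1 - (m + 1))) % FR_MODULUS
        = pvQa v root (n - 1 - m) := by
      have h1 : n - 1 - m = (n - 1 - (m + 1)) + 1 := by omega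
      rw [h1]
      show _ = (v.getD (v.length - 2 - (n - 1 - (m + 1))) 0
        + root * pvQa v root (n - 1 - (m + 1))) % FR_MODULUS
      have h2 : v.length - 2 - (n - 1 - (m + 1)) = m + 1 := by omega
      rw [h2]
    rw [hval]
    have hset : ((List.range n).map (fun j => if m + 1 ≤ j then pvQa v root (n - 1 - j) else 0)).set m
        (pvQa v root (n - 1 - m))
        = (List.range n).map (fun j => if m ≤ j then pvQa v root (n - 1 - j) else 0) := by
      apply List.ext_getElem
      · simp
      · intro j h1 h2
        rw [List.getElem_set]
        simp only [List.getElem_map, List.getElem_range]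
        by_cases hj : m = j
        · subst hj; rw [if_pos rfl, if_pos le_rfl]
        · rw [if_neg hj]
          by_cases hle : m ≤ j
          · rw [if_pos (by omega), if_pos hle]
          · rw [if_neg (by omega), if_neg hle]
    rw [hset]
    exact ih (by omega)

theorem pv_div_char (v : List Int) (n : Nat) (hv : v.length = n + 1) (hn : 1 ≤ n) (root : Int) :
    poly_div_linear v root = (List.range n).map (fun j => pvQa v root (n - 1 - j)) := by
  have hvne : v ≠ [] := by intro h0; rw [h0] at hv; simp at hv
  simp only [poly_div_linear, PySem.List.len_eq, pv_fr_eq]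
  have hlen : ((v.length : Int) - 1) = (n : Int) := by rw [hv]; omega
  rw [hlen]
  have htn : ((n : Int)).toNat = n := by omega
  rw [htn]
  have hget : PySem.List.pyGetD v (-1) 0 = v.getD n 0 := by
    rw [PySem.List.pyGetD_neg_one v 0 hvne, List.getLast_eq_getElem,
      List.getD_eq_getElem _ _ (by omega)]
    congr 1
    omega
  rw [hget]
  have hsetneg : PySem.List.pySetD (List.replicate n (0:Int)) (-1) (v.getD n 0)
      = (List.replicate n (0:Int)).set (n - 1) (v.getD n 0) := by
    have h1 : (1:Nat) ≤ n := hn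
    unfold PySem.List.pySetD PySem.List.pySet? PySem.List.pyIdx?
    simp only [List.length_replicate]
    rw [if_neg (by norm_num), if_pos (by omega)]
    simp
  rw [hsetneg]
  have hq0 : (List.replicate n (0:Int)).set (n - 1) (v.getD n 0)
      = (List.range n).map (fun j => if n - 1 ≤ j then pvQa v root (n - 1 - j) else 0) := by
    apply List.ext_getElem
    · simp
    · intro j h1 h2
      rw [List.getElem_set]
      simp only [List.getElem_map, List.getElem_range, List.getElem_replicate]
      by_cases hj : n - 1 = j
      · subst hj
        rw [if_pos rfl, if_pos le_rfl]
        have : n - 1 - (n - 1) = 0 := by omega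
        rw [this]
        show _ = v.getD (v.length - 1) 0
        rw [hv]
        norm_num
      · rw [if_neg hj, if_neg (by simp at h1; omega)]
  rw [hq0]
  have hcast : ((n : Int) - 1) = ((n - 1 : Nat) : Int) := by omega
  rw [hcast]
  exact pv_div_loop v root n hv (n - 1) le_rfl

theorem pv_Qa_modeq (v : List Int) (root : Int) (n : Nat) (hv : v.length = n + 1) :
    ∀ i, pvQa v root i % FR_MODULUS
      = (∑ d ∈ Finset.range (i + 1), v.getD (n - d) 0 * root ^ (i - d)) % FR_MODULUS := by
  intro i
  induction i with
  | zero =>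
    show v.getD (v.length - 1) 0 % FR_MODULUS = _
    rw [Finset.sum_range_one]
    have : v.length - 1 = n := by omega
    rw [this]
    simp
  | succ i ih =>
    show ((v.getD (v.length - 2 - i) 0 + root * pvQa v root i) % FR_MODULUS) % FR_MODULUS = _
    rw [Int.emod_emod_of_dvd _ dvd_rfl]
    have hl : v.length - 2 - i = n - 1 - i := by omega
    rw [hl]
    have hstep : (v.getD (n - 1 - i) 0 + root * pvQa v root i) % FR_MODULUS
        = (v.getD (n - 1 - i) 0
            + root * ∑ d ∈ Finset.range (i + 1), v.getD (n - d) 0 * root ^ (i - d)) % FR_MODULUS := by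
      conv_lhs => rw [Int.add_emod, Int.mul_emod, ih]
      conv_rhs => rw [Int.add_emod, Int.mul_emod]
    rw [hstep]
    congr 1
    conv_rhs => rw [Finset.sum_range_succ]
    have hlast : v.getD (n - (i + 1)) 0 * root ^ (i + 1 - (i + 1)) = v.getD (n - 1 - i) 0 := by
      have : n - (i + 1) = n - 1 - i := by omega
      rw [this, Nat.sub_self, pow_zero, mul_one]
    rw [hlast]
    have hsum : ∑ d ∈ Finset.range (i + 1), v.getD (n - d) 0 * root ^ (i + 1 - d)
        = root * ∑ d ∈ Finset.range (i + 1), v.getD (n - d) 0 * root ^ (i - d) := by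
      rw [Finset.mul_sum]
      apply Finset.sum_congr rfl
      intro d hd
      rw [Finset.mem_range] at hd
      have : i + 1 - d = (i - d) + 1 := by omega
      rw [this, pow_succ]
      ring
    rw [hsum]
    ring

-- the weighted power sums
def pvPw (w x : Int) : Nat → Int
  | 0 => w
  | r+1 => pvPw w x r * x % FR_MODULUS

theorem pv_pw_modeq (w x : Int) : ∀ r, pvPw w x r % FR_MODULUS = (w * x ^ r) % FR_MODULUS := by
  intro r
  induction r with
  | zero => simp [pvPw]
  | succ r ih =>
    show (pvPw w x r * x % FR_MODULUS) % FR_MODULUS = _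
    rw [Int.emod_emod_of_dvd _ dvd_rfl, Int.mul_emod, ih, ← Int.mul_emod, pow_succ, ← mul_assoc]

-- A's nested accumulation loop, as a per-coefficient fold
theorem pv_outer (n : Nat) (t : Nat → Nat → Int) :
    ∀ (l : List Nat) (g : Nat → Int),
    l.foldl (fun st i =>
        (List.range n).foldl (fun st k => st.set k ((st.getD k 0 + t i k) % FR_MODULUS)) st)
      ((List.range n).map g)
    = (List.range n).map (fun k => l.foldl (fun a i => (a + t i k) % FR_MODULUS) (g k)) := by
  intro l
  induction l with
  | nil => intro g; simp
  | cons i l ih =>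
    intro g
    simp only [List.foldl_cons]
    have hstep : (List.range n).foldl
        (fun st k => st.set k ((st.getD k 0 + t i k) % FR_MODULUS)) ((List.range n).map g)
        = (List.range n).map (fun k => (g k + t i k) % FR_MODULUS) := by
      rw [pv_foldl_set_pointwise (fun k x => (x + t i k) % FR_MODULUS) n _ (by simp)]
      apply List.ext_getElem
      · simp
      · intro j h1 h2
        simp only [List.getElem_mapIdx, List.getElem_map, List.getElem_range]
        rw [if_pos (by simp at h1; omega)]
    rw [hstep, ih]

-- the common scale (Lagrange weight times y) term
def pvScale (xs ys : List Int) (n i : Nat) : Int :=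
  ys.getD i 0 * powmod
      ((List.range n).foldl
        (fun (d : Int) (m : Nat) => if (m : Int) = (i : Int) then d
          else d * (xs.getD i 0 - xs.getD m 0) % FR_MODULUS) 1)
      (FR_MODULUS - 2).toNat FR_MODULUS % FR_MODULUS

theorem pvScale_fold (xs ys : List Int) (n i : Nat) :
    ys.getD i 0 * powmod
      ((List.range n).foldl
        (fun (d : Int) (m : Nat) => if (m : Int) = (i : Int) then d
          else d * (xs.getD i 0 - xs.getD m 0) % FR_MODULUS) 1)
      (FR_MODULUS - 2).toNat FR_MODULUS % FR_MODULUS = pvScale xs ys n i := rfl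

theorem pv_frP : frP = FR_MODULUS := rfl

-- B's S/pw loop, characterized
theorem pv_spw (xs : List Int) (w : Nat → Int) (n : Nat) (hx : xs.length = n) :
    ∀ r : Nat,
    (List.range r).foldl
      (fun (sp : List Int × List Int) (_ : Nat) =>
        (sp.1 ++ [sp.2.sum % FR_MODULUS],
         (sp.2.zip xs).map (fun (p : Int × Int) => p.1 * p.2 % FR_MODULUS)))
      ([], (List.range n).map w)
    = ((List.range r).map (fun t =>
          ((List.range n).map (fun i => pvPw (w i) (xs.getD i 0) t)).sum % FR_MODULUS),
       (List.range n).map (fun i => pvPw (w i) (xs.getD i 0) r)) := by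
  intro r
  induction r with
  | zero => simp [pvPw]
  | succ r ih =>
    rw [List.range_succ, List.foldl_append, ih]
    simp only [List.foldl_cons, List.foldl_nil]
    have h2 : ((List.range n).map (fun i => pvPw (w i) (xs.getD i 0) r)).zip xs
        = (List.range n).map (fun i => (pvPw (w i) (xs.getD i 0) r, xs.getD i 0)) := by
      have h := pv_zip_map_range (fun i => pvPw (w i) (xs.getD i 0) r) xs
      rw [hx] at h
      exact h
    rw [h2, List.map_map]
    refine congrArg₂ Prod.mk ?_ ?_
    · rw [List.map_append]
      simp
    · apply List.map_congr_left
      intro i _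
      simp [pvPw]

-- A characterized
theorem pv_A_char (xs ys : List Int) (h : xs.length = ys.length) (hn : 1 ≤ xs.length) :
    interpolate_coeffs xs ys
      = (List.range xs.length).map (fun k =>
          ((List.range xs.length).map (fun i =>
            pvScale xs ys xs.length i
              * pvQa (xs.foldl mulLin [1]) (xs.getD i 0) (xs.length - 1 - k))).sum
          % FR_MODULUS) := by
  unfold interpolate_coeffs
  rw [if_neg (by simp [PySem.List.len_eq, h])]
  have hV := (pv_v_spec xs).1
  have hvlen := (pv_v_spec xs).2.1
  have hdiv := pv_div_char (xs.foldl mulLin [1]) xs.length hvlen hn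
  have htn : ((xs.length : Int)).toNat = xs.length := by omega
  simp only [PySem.List.len_eq, hV, htn, PySem.List.pyRange_zero_natCast, List.foldl_map,
    PySem.List.pyGetD_natCast, PySem.List.pySetD_natCast, pv_fr_eq, pv_fr_inv_eq, hdiv,
    pvScale_fold]
  rw [show List.replicate xs.length (0:Int) = (List.range xs.length).map (fun _ => 0) by
    rw [List.map_const', List.length_range]]
  rw [pv_outer xs.length
    (fun i k => pvScale xs ys xs.length i
      * ((List.range xs.length).map
          (fun j => pvQa (xs.foldl mulLin [1]) (xs.getD i 0) (xs.length - 1 - j))).getD k 0)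
    (List.range xs.length) (fun _ => 0)]
  apply List.map_congr_left
  intro k hk
  rw [List.mem_range] at hk
  beta_reduce
  rw [pv_foldl_addmod0]
  congr 1
  congr 1
  apply List.map_congr_left
  intro i _
  rw [PySem.List.getD_map_range _ _ _ _ hk]

-- B characterized
theorem pv_B_char (xs ys : List Int) (h : xs.length = ys.length) :
    interpolate_coeffs_alt xs ys
      = (List.range xs.length).map (fun k =>
          ((List.range (xs.length - k)).map (fun u =>
            (xs.foldl mulLin [1]).getD (k + 1 + u) 0
              * (((List.range xs.length).map (fun i =>
                    pvPw (pvScale xs ys xs.length i) (xs.getD i 0) u)).sum % FR_MODULUS))).sum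
          % FR_MODULUS) := by
  unfold interpolate_coeffs_alt
  rw [if_neg (by simp [PySem.List.len_eq, h])]
  simp only [PySem.List.len_eq, pv_frP, PySem.List.pyRange_zero_natCast, List.foldl_map,
    PySem.List.foldl_append_singleton_eq_map, List.nil_append, List.map_map,
    PySem.List.pyGetD_natCast, PySem.Int.mod_eq_emod_of_pos pv_hM, pvScale_fold]
  rw [pv_spw xs (fun i => pvScale xs ys xs.length i) xs.length rfl xs.length]
  dsimp only
  apply List.map_congr_left
  intro k hk
  rw [List.mem_range] at hk
  simp only [Function.comp_apply]
  have hT : (((xs.length : Int) + 1) - ((k : Int) + 1)).toNat = xs.length - k := by omega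
  rw [PySem.List.pyRange_one, hT, List.map_map]
  congr 1
  congr 1
  apply List.map_congr_left
  intro u hu
  rw [List.mem_range] at hu
  simp only [Function.comp_apply]
  have hidx : ((k : Int) + 1 + (u : Int)) = ((k + 1 + u : Nat) : Int) := by push_cast; ring
  have hidx2 : ((k + 1 + u : Nat) : Int) - 1 - (k : Int) = ((u : Nat) : Int) := by
    push_cast; ring
  rw [hidx, hidx2, PySem.List.pyGetD_natCast, PySem.List.pyGetD_natCast]
  rw [PySem.List.getD_map_range _ _ _ _ (by omega)]

-- the per-coefficient identity connecting the two algorithms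
theorem pv_key (v : List Int) (xv s : Nat → Int) (n k : Nat) (hk : k < n)
    (hv : v.length = n + 1) :
    ((List.range n).map (fun i => s i * pvQa v (xv i) (n - 1 - k))).sum % FR_MODULUS
    = ((List.range (n - k)).map (fun u =>
        v.getD (k + 1 + u) 0
          * (((List.range n).map (fun i => pvPw (s i) (xv i) u)).sum % FR_MODULUS))).sum
      % FR_MODULUS := by
  simp only [pv_sum_range]
  have hnk : n - 1 - k + 1 = n - k := by omega
  calc (∑ i ∈ Finset.range n, s i * pvQa v (xv i) (n - 1 - k)) % FR_MODULUS
      = (∑ i ∈ Finset.range n,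
          s i * ∑ u ∈ Finset.range (n - k), v.getD (k + 1 + u) 0 * (xv i) ^ u) % FR_MODULUS := by
        apply pv_sum_modeq
        intro i _
        apply pv_mul_congr_right
        rw [pv_Qa_modeq v (xv i) n hv (n - 1 - k), hnk]
        congr 1
        calc ∑ d ∈ Finset.range (n - k), v.getD (n - d) 0 * (xv i) ^ (n - 1 - k - d)
            = ∑ d ∈ Finset.range (n - k),
                v.getD (k + 1 + (n - k - 1 - d)) 0 * (xv i) ^ (n - k - 1 - d) := by
              apply Finset.sum_congr rfl
              intro d hd
              rw [Finset.mem_range] at hd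
              have e1 : k + 1 + (n - k - 1 - d) = n - d := by omega
              have e2 : n - k - 1 - d = n - 1 - k - d := by omega
              rw [e1, e2]
          _ = ∑ u ∈ Finset.range (n - k), v.getD (k + 1 + u) 0 * (xv i) ^ u :=
              Finset.sum_range_reflect (fun u => v.getD (k + 1 + u) 0 * (xv i) ^ u) (n - k)
    _ = (∑ u ∈ Finset.range (n - k),
          v.getD (k + 1 + u) 0 * ∑ i ∈ Finset.range n, s i * (xv i) ^ u) % FR_MODULUS := by
        congr 1
        simp_rw [Finset.mul_sum]
        rw [Finset.sum_comm]
        apply Finset.sum_congr rfl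
        intro u _
        apply Finset.sum_congr rfl
        intro i _
        ring
    _ = (∑ u ∈ Finset.range (n - k),
          v.getD (k + 1 + u) 0
            * ((∑ i ∈ Finset.range n, pvPw (s i) (xv i) u) % FR_MODULUS)) % FR_MODULUS := by
        apply pv_sum_modeq
        intro u _
        apply pv_mul_congr_right
        conv_rhs => rw [Int.emod_emod_of_dvd _ dvd_rfl]
        exact (pv_sum_modeq _ (fun i _ => pv_pw_modeq (s i) (xv i) u)).symm

theorem interpolate_coeffs_main (xs ys : List Int) (h : xs.length = ys.length) :
    interpolate_coeffs xs ys = interpolate_coeffs_alt xs ys := by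
  by_cases hn : xs.length = 0
  · have hx : xs = [] := List.eq_nil_of_length_eq_zero hn
    have hy : ys = [] := List.eq_nil_of_length_eq_zero (by omega)
    subst hx; subst hy
    decide
  · have hn1 : 1 ≤ xs.length := by omega
    rw [pv_A_char xs ys h hn1, pv_B_char xs ys h]
    apply List.map_congr_left
    intro k hk
    rw [List.mem_range] at hk
    exact pv_key (xs.foldl mulLin [1]) (fun i => xs.getD i 0)
      (fun i => pvScale xs ys xs.length i) xs.length k hk (pv_v_spec xs).2.1

-- ===== VERDICT (by name: the statement is the Claim_ definition above) =====
theorem interpolate_coeffs_spec : Claim_equal_interpolate_coeffs := by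
  intro xs ys _ hpre
  unfold Spec_interpolate_coeffs
  exact interpolate_coeffs_main xs ys hpre.1
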